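-- pv_equiv track=rewrite | github.com/mlellouch/experiment_processing | research/free_gaze_blurred/statistics/measurements.py | calc_horizontal_lines
-- ===== SOURCE A (Python) =====
-- def calc_horizontal_lines(matrix, length):
--     n = len(matrix)
--     count = 0
--     count_length = 0
--     for i in range(n):
--         horizontal = matrix[i]
--         temp_count, temp_count_length = calc_ones(horizontal, length)
--         count += temp_count
--         count_length += temp_count_length
--     return count, count_length
--
-- def calc_ones(vector, length):
--     index = 0
--     count = 0
--     count_length = 0
--     while index < len(vector):
--         l = 0
--         while index < len(vector) and vector[index] == 1:
--             l += 1
--             index += 1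
--         index += 1
--         if l >= length:
--             count += 1
--             count_length += l
--     return count, count_length
-- ===== SOURCE B (Python) =====
-- def calc_horizontal_lines(matrix, length):
--     # Boundary arithmetic: runs of ones are the gaps between consecutive
--     # non-one positions; the trailing gap is kept only when nonempty.
--     count = 0
--     count_length = 0
--     for row in matrix:
--         pos = [i for i, x in enumerate(row) if x != 1]
--         bounds = [-1] + pos
--         gaps = [p - q - 1 for q, p in zip(bounds, pos)]
--         tail = len(row) - bounds[-1] - 1
--         if tail > 0:
--             gaps.append(tail)
--         for g in gaps:
--             if g >= length:
--                 count += 1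
--                 count_length += g
--     return count, count_length
-- ===== Notes on version B (the rewrite author's own statement) =====
-- stated objective: alternative
-- what changed: Replaces A's sequential index/inner-while run scanning with boundary arithmetic: each row's non-one positions are listed once via enumerate/filter, run lengths are the pairwise differences between consecutive boundaries (zip of the shifted boundary list), plus a nonempty trailing gap.
import Mathlib
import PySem

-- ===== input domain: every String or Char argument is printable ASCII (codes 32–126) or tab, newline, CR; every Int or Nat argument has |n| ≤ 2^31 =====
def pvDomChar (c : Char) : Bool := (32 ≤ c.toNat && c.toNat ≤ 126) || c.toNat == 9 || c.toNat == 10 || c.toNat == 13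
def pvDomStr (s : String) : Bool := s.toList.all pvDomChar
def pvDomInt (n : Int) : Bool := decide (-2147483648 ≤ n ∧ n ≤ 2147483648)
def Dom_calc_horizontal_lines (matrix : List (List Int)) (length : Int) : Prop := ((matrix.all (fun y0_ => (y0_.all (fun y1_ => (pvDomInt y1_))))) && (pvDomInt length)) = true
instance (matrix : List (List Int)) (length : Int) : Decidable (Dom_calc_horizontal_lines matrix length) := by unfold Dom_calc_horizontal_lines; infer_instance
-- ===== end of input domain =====

-- B replaces A's sequential index/inner-while run scanning by boundary arithmetic:
-- the non-one positions of a row are listed once and run lengths are the pairwise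
-- differences between consecutive boundaries (alternative decomposition; same cost).

-- ===== PORT A =====

-- inner `while index < len(vector) and vector[index] == 1` : returns (l, remaining suffix)
def pvTakeRun : List Int → Nat × List Int
  | [] => (0, [])
  | x :: xs => if x = 1 then ((pvTakeRun xs).1 + 1, (pvTakeRun xs).2) else (0, x :: xs)

theorem pvTakeRun_length : ∀ v : List Int, (pvTakeRun v).1 + (pvTakeRun v).2.length = v.length := by
  intro v
  induction v with
  | nil => simp [pvTakeRun]
  | cons x xs ih =>
    by_cases h : x = 1
    · simp [pvTakeRun, h]; omega
    · simp [pvTakeRun, h]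

-- outer `while index < len(vector)` of calc_ones, as recursion on the remaining suffix
def pvCalcOnesGo (len : Int) : List Int → Int × Int → Int × Int
  | [], acc => acc
  | x :: xs, acc =>
    let p := pvTakeRun (x :: xs)
    let rest := p.2.drop 1          -- the final `index += 1`
    let acc' := if (p.1 : Int) ≥ len then (acc.1 + 1, acc.2 + (p.1 : Int)) else acc
    pvCalcOnesGo len rest acc'
termination_by v _ => v.length
decreasing_by
  have h := pvTakeRun_length (x :: xs)
  simp at h ⊢
  omega

def pvCalcOnes (vector : List Int) (len : Int) : Int × Int := pvCalcOnesGo len vector (0, 0)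

def calc_horizontal_lines (matrix : List (List Int)) (length : Int) : Int × Int :=
  matrix.foldl
    (fun acc horizontal =>
      let t := pvCalcOnes horizontal length
      (acc.1 + t.1, acc.2 + t.2))
    (0, 0)

-- ===== PORT B =====

-- `pos = [i for i, x in enumerate(row) if x != 1]`
def pvPos (row : List Int) : List Int :=
  ((PySem.List.enumerate row).filter (fun ix => ix.2 ≠ 1)).map (fun ix => ix.1)

-- per-row run lengths: gaps between consecutive boundaries, plus a nonempty tail gap
def pvGaps (row : List Int) : List Int :=
  let pos := pvPos row
  let bounds := (-1) :: pos
  let gaps := (bounds.zip pos).map (fun qp => qp.2 - qp.1 - 1)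
  let tail := (row.length : Int) - bounds.getLast (by simp) - 1
  if tail > 0 then gaps ++ [tail] else gaps

-- one step of B's `for g in gaps` loop
def pvTallyI (len : Int) (acc : Int × Int) (g : Int) : Int × Int :=
  if g ≥ len then (acc.1 + 1, acc.2 + g) else acc

def calc_horizontal_lines_alt (matrix : List (List Int)) (length : Int) : Int × Int :=
  matrix.foldl (fun acc row => (pvGaps row).foldl (pvTallyI length) acc) (0, 0)

-- ===== PRECONDITION & SPEC =====
def Spec_calc_horizontal_lines (matrix : List (List Int)) (length : Int) (out : Int × Int) : Prop := out = calc_horizontal_lines_alt matrix length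
instance (matrix : List (List Int)) (length : Int) (out : Int × Int) : Decidable (Spec_calc_horizontal_lines matrix length out) := by unfold Spec_calc_horizontal_lines; infer_instance

-- ===== CLAIM (what is proved, stated in full; the proofs are below) =====
def Claim_equal_calc_horizontal_lines : Prop := ∀ (matrix : List (List Int)) (length : Int), Dom_calc_horizontal_lines matrix length → Spec_calc_horizontal_lines matrix length (calc_horizontal_lines matrix length)

-- ===== LEMMAS AND PROOFS =====

-- structural intermediate: A's run list (current run length `cur` carried along)
def pvSegsRec : List Int → Nat → List Nat
  | [], cur => if cur > 0 then [cur] else []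
  | x :: xs, cur => if x = 1 then pvSegsRec xs (cur + 1) else cur :: pvSegsRec xs 0

-- B's gap list in recursive form: current index i, last boundary q
def pvGapsGo : List Int → Int → Int → List Int
  | [], i, q => if i - q - 1 > 0 then [i - q - 1] else []
  | x :: xs, i, q => if x ≠ 1 then (i - q - 1) :: pvGapsGo xs (i + 1) i else pvGapsGo xs (i + 1) q

-- positions of non-ones, enumeration starting at i
def pvPosFrom (row : List Int) (i : Int) : List Int :=
  ((PySem.List.enumerate row i).filter (fun ix => ix.2 ≠ 1)).map (fun ix => ix.1)

theorem pvPosFrom_cons (x : Int) (xs : List Int) (i : Int) :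
    pvPosFrom (x :: xs) i = if x ≠ 1 then i :: pvPosFrom xs (i + 1) else pvPosFrom xs (i + 1) := by
  by_cases h : x = 1 <;> simp [pvPosFrom, PySem.List.enumerate_cons, h]

-- B's zip/getLast pipeline, generalized over start index and last boundary, equals pvGapsGo
theorem pvGaps_pipeline : ∀ (row : List Int) (i q : Int),
    (let pos := pvPosFrom row i
     let bounds := q :: pos
     let gaps := (bounds.zip pos).map (fun qp => qp.2 - qp.1 - 1)
     let tail := (i + (row.length : Int)) - bounds.getLast (by simp) - 1
     if tail > 0 then gaps ++ [tail] else gaps) = pvGapsGo row i q := by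
  intro row
  induction row with
  | nil =>
    intro i q
    simp [pvPosFrom, PySem.List.enumerate, pvGapsGo]
  | cons x xs ih =>
    intro i q
    by_cases h : x = 1
    · have hp := pvPosFrom_cons x xs i
      simp only [h, ne_eq, not_true_eq_false, if_false] at hp
      have hih := ih (i + 1) q
      simp only [pvGapsGo, h, ne_eq, not_true_eq_false, if_false]
      simp only [hp]
      rw [← hih]
      simp only [List.length_cons]
      push_cast
      rw [show i + ((xs.length : Int) + 1) = i + 1 + (xs.length : Int) from by ring]
    · have hp := pvPosFrom_cons x xs i
      simp only [h, ne_eq, not_false_eq_true, if_true] at hp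
      have hih := ih (i + 1) i
      simp only [pvGapsGo, h, ne_eq, not_false_eq_true, if_true]
      simp only [hp]
      rw [← hih]
      simp only [List.length_cons, List.zip_cons_cons, List.map_cons, List.getLast_cons_cons]
      push_cast
      rw [show i + ((xs.length : Int) + 1) = i + 1 + (xs.length : Int) from by ring]
      split_ifs <;> simp

theorem pvGaps_eq_go (row : List Int) : pvGaps row = pvGapsGo row 0 (-1) := by
  have := pvGaps_pipeline row 0 (-1)
  simpa [pvGaps, pvPos, pvPosFrom] using this

-- pvGapsGo computes the cast of A's structural run list
theorem pvGapsGo_eq_segs : ∀ (row : List Int) (i : Int) (cur : Nat),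
    pvGapsGo row i (i - (cur : Int) - 1) = (pvSegsRec row cur).map (fun (n : Nat) => (n : Int)) := by
  intro row
  induction row with
  | nil =>
    intro i cur
    have hv : i - (i - (cur : Int) - 1) - 1 = (cur : Int) := by ring
    simp only [pvGapsGo, pvSegsRec, hv]
    by_cases h : cur > 0
    · have h' : ((cur : Int)) > 0 := by exact_mod_cast h
      simp [h, h']
    · have hc : cur = 0 := by omega
      simp [hc]
  | cons x xs ih =>
    intro i cur
    by_cases h : x = 1
    · have h1 : i + 1 - ((cur + 1 : Nat) : Int) - 1 = i - (cur : Int) - 1 := by push_cast; ring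
      have hih := ih (i + 1) (cur + 1)
      rw [h1] at hih
      simpa [pvGapsGo, pvSegsRec, h] using hih
    · have hv : i - (i - (cur : Int) - 1) - 1 = (cur : Int) := by ring
      have h2 := ih (i + 1) 0
      have h0 : i + 1 - ((0 : Nat) : Int) - 1 = i := by push_cast; ring
      rw [h0] at h2
      simp [pvGapsGo, pvSegsRec, h, hv, h2]

theorem pvGaps_eq_segsRec (row : List Int) :
    pvGaps row = (pvSegsRec row 0).map (fun (n : Nat) => (n : Int)) := by
  rw [pvGaps_eq_go]
  have := pvGapsGo_eq_segs row 0 0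
  simpa using this

theorem pvSegsRec_takeRun : ∀ (v : List Int) (cur : Nat),
    pvSegsRec v cur =
      (match (pvTakeRun v).2 with
       | [] => if cur + (pvTakeRun v).1 > 0 then [cur + (pvTakeRun v).1] else []
       | _ :: tail => (cur + (pvTakeRun v).1) :: pvSegsRec tail 0) := by
  intro v
  induction v with
  | nil => intro cur; simp [pvSegsRec, pvTakeRun]
  | cons x xs ih =>
    intro cur
    by_cases h : x = 1
    · rw [show pvSegsRec (x :: xs) cur = pvSegsRec xs (cur + 1) from by simp [pvSegsRec, h]]
      rw [ih (cur + 1)]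
      have ha : (pvTakeRun (x :: xs)).1 = (pvTakeRun xs).1 + 1 := by simp [pvTakeRun, h]
      have hb : (pvTakeRun (x :: xs)).2 = (pvTakeRun xs).2 := by simp [pvTakeRun, h]
      rw [ha, hb, show cur + 1 + (pvTakeRun xs).1 = cur + ((pvTakeRun xs).1 + 1) from by omega]
    · simp [pvSegsRec, pvTakeRun, h]

-- Nat-list version of the tally step, bridging to pvTallyI over the cast list
def pvTally (len : Int) (acc : Int × Int) (l : Nat) : Int × Int :=
  if (l : Int) ≥ len then (acc.1 + 1, acc.2 + (l : Int)) else acc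

theorem pvTallyI_map (len : Int) : ∀ (s : List Nat) (a : Int × Int),
    (s.map (fun (n : Nat) => (n : Int))).foldl (pvTallyI len) a = s.foldl (pvTally len) a := by
  intro s
  induction s with
  | nil => intro a; rfl
  | cons l s ih =>
    intro a
    simp only [List.map_cons, List.foldl_cons]
    rw [ih]
    rfl

-- B's tally fold is an additive shift of the (0,0)-based fold
theorem pvTallyI_foldl_shift (len : Int) : ∀ (s : List Int) (a : Int × Int),
    s.foldl (pvTallyI len) a =
      (a.1 + (s.foldl (pvTallyI len) (0, 0)).1, a.2 + (s.foldl (pvTallyI len) (0, 0)).2) := by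
  intro s
  induction s with
  | nil => intro a; simp
  | cons g s ih =>
    intro a
    simp only [List.foldl_cons]
    rw [ih (pvTallyI len a g), ih (pvTallyI len (0, 0) g)]
    by_cases h : g ≥ len <;>
      simp [pvTallyI, h, Prod.ext_iff] <;> constructor <;> ring

-- A's per-row loop computes the tally over the structural run list
theorem pvCalcOnesGo_eq (len : Int) (v : List Int) (acc : Int × Int) :
    pvCalcOnesGo len v acc = (pvSegsRec v 0).foldl (pvTally len) acc := by
  match v with
  | [] => simp [pvCalcOnesGo, pvSegsRec]
  | x :: xs =>
    rw [pvCalcOnesGo, pvSegsRec_takeRun (x :: xs) 0]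
    have hlen := pvTakeRun_length (x :: xs)
    rcases hr : (pvTakeRun (x :: xs)).2 with _ | ⟨d, tail⟩
    · have hl : (pvTakeRun (x :: xs)).1 > 0 := by
        rw [hr] at hlen
        simp only [List.length_nil, List.length_cons] at hlen
        omega
      simp [pvCalcOnesGo, pvTally, hl]
    · have hlt : tail.length ≤ xs.length := by
        rw [hr] at hlen
        simp only [List.length_cons] at hlen
        omega
      have ih := pvCalcOnesGo_eq len tail
        (if ((pvTakeRun (x :: xs)).1 : Int) ≥ len then (acc.1 + 1, acc.2 + ((pvTakeRun (x :: xs)).1 : Int)) else acc)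
      simp only [List.drop_succ_cons, List.drop_zero, List.foldl_cons]
      rw [ih]
      by_cases h : ((pvTakeRun (x :: xs)).1 : Int) ≥ len <;> simp [pvTally, h]
termination_by v.length
decreasing_by
  exact Nat.lt_succ_of_le hlt

theorem pvCalcOnes_eq (v : List Int) (len : Int) :
    pvCalcOnes v len = (pvGaps v).foldl (pvTallyI len) (0, 0) := by
  rw [pvCalcOnes, pvCalcOnesGo_eq, pvGaps_eq_segsRec, pvTallyI_map]

-- ===== VERDICT (by name: the statement is the Claim_ definition above) =====
theorem calc_horizontal_lines_spec : Claim_equal_calc_horizontal_lines := by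
  intro matrix length _
  unfold Spec_calc_horizontal_lines calc_horizontal_lines calc_horizontal_lines_alt
  have hstep : (fun (acc : Int × Int) (horizontal : List Int) =>
      let t := pvCalcOnes horizontal length
      (acc.1 + t.1, acc.2 + t.2)) =
      (fun (acc : Int × Int) (row : List Int) => (pvGaps row).foldl (pvTallyI length) acc) := by
    funext acc row
    rw [pvCalcOnes_eq, pvTallyI_foldl_shift length (pvGaps row) acc]
  rw [hstep]
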